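-- pv_equiv track=rewrite | github.com/Joao-sl/RecipesAPI | utils/password.py | strong_password_check
-- ===== SOURCE A (Python) =====
-- import string
--
-- def strong_password_check(password):
--     """
--         Return True if password has ascii lower, upper, digit and punctuation. \n
--         Otherwise return False.
--     """
--     has_lower = any(char in string.ascii_lowercase for char in password)
--     has_upper = any(char in string.ascii_uppercase for char in password)
--     has_digit = any(char in string.digits for char in password)
--     has_punctuation = any(char in string.punctuation for char in password)
--
--     if has_lower and has_upper and has_digit and has_punctuation:
--         return True
--
--     return False
-- ===== SOURCE B (Python) =====
-- import string
--
-- def strong_password_check(password):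
--     has_lower = has_upper = has_digit = has_punctuation = False
--     for char in password:
--         if char in string.ascii_lowercase:
--             has_lower = True
--         if char in string.ascii_uppercase:
--             has_upper = True
--         if char in string.digits:
--             has_digit = True
--         if char in string.punctuation:
--             has_punctuation = True
--     return has_lower and has_upper and has_digit and has_punctuation
-- ===== Notes on version B (the rewrite author's own statement) =====
-- stated objective: alternative
-- what changed: Replaces four independent any(...) passes over the password with a single traversal that accumulates four boolean flags and returns their conjunction.
import Mathlib
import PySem

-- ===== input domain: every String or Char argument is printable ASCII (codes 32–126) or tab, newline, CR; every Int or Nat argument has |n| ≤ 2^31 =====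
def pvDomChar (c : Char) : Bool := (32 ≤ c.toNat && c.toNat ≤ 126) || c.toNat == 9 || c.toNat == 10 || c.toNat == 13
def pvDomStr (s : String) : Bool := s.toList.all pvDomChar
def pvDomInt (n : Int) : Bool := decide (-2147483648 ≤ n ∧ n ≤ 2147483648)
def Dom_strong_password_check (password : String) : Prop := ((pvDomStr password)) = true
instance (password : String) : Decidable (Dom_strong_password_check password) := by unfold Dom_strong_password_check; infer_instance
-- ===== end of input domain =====

-- B performs one traversal accumulating four flags instead of A's four `any` passes; objective: alternative (same cost).

-- string.ascii_lowercase / ascii_uppercase / digits / punctuation, shared by both ports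
def pvAsciiLowercase : String := "abcdefghijklmnopqrstuvwxyz"
def pvAsciiUppercase : String := "ABCDEFGHIJKLMNOPQRSTUVWXYZ"
def pvDigits : String := "0123456789"
def pvPunctuation : String := "!\"#$%&'()*+,-./:;<=>?@[\\]^_`{|}~"

-- ===== PORT A =====
def strong_password_check (password : String) : Bool :=
  let has_lower := password.toList.any (fun char => pvAsciiLowercase.toList.contains char)
  let has_upper := password.toList.any (fun char => pvAsciiUppercase.toList.contains char)
  let has_digit := password.toList.any (fun char => pvDigits.toList.contains char)
  let has_punctuation := password.toList.any (fun char => pvPunctuation.toList.contains char)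
  if has_lower && has_upper && has_digit && has_punctuation then true
  else false

-- ===== PORT B =====
-- one fold over the characters, state = (has_lower, has_upper, has_digit, has_punctuation)
def pvStepB (s : Bool × Bool × Bool × Bool) (char : Char) : Bool × Bool × Bool × Bool :=
  let s := if pvAsciiLowercase.toList.contains char then (true, s.2.1, s.2.2.1, s.2.2.2) else s
  let s := if pvAsciiUppercase.toList.contains char then (s.1, true, s.2.2.1, s.2.2.2) else s
  let s := if pvDigits.toList.contains char then (s.1, s.2.1, true, s.2.2.2) else s
  let s := if pvPunctuation.toList.contains char then (s.1, s.2.1, s.2.2.1, true) else s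
  s

def strong_password_check_alt (password : String) : Bool :=
  let r := password.toList.foldl pvStepB (false, false, false, false)
  r.1 && r.2.1 && r.2.2.1 && r.2.2.2

-- ===== PRECONDITION & SPEC =====
def Spec_strong_password_check (password : String) (out : Bool) : Prop := out = strong_password_check_alt password
instance (password : String) (out : Bool) : Decidable (Spec_strong_password_check password out) := by unfold Spec_strong_password_check; infer_instance

-- ===== CLAIM (what is proved, stated in full; the proofs are below) =====
def Claim_equal_strong_password_check : Prop := ∀ (password : String), Dom_strong_password_check password → Spec_strong_password_check password (strong_password_check password)

-- ===== LEMMAS AND PROOFS =====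

-- loop invariant: the fold ORs each flag with `any` of its class over the remaining characters
theorem pvFoldB_eq (l : List Char) (a b c d : Bool) :
    l.foldl pvStepB (a, b, c, d) =
      (a || l.any (fun ch => pvAsciiLowercase.toList.contains ch),
       b || l.any (fun ch => pvAsciiUppercase.toList.contains ch),
       c || l.any (fun ch => pvDigits.toList.contains ch),
       d || l.any (fun ch => pvPunctuation.toList.contains ch)) := by
  induction l generalizing a b c d with
  | nil => simp
  | cons x xs ih =>
    simp only [List.foldl_cons, List.any_cons]
    rw [show pvStepB (a, b, c, d) x =
        (a || pvAsciiLowercase.toList.contains x,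
         b || pvAsciiUppercase.toList.contains x,
         c || pvDigits.toList.contains x,
         d || pvPunctuation.toList.contains x) from by
      simp only [pvStepB]
      split_ifs <;> simp_all]
    rw [ih]
    simp [Bool.or_assoc]

theorem strong_password_check_spec : Claim_equal_strong_password_check := by
  intro password _
  unfold Spec_strong_password_check strong_password_check strong_password_check_alt
  rw [pvFoldB_eq]
  simp [List.any_eq, Bool.and_assoc]
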